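-- pv_equiv track=rewrite | github.com/jbuggs-droid/2026-Conquest-Storage | scripts/extract_c64_maps.py | nearby_labels
-- ===== SOURCE A (Python) =====
-- def nearby_labels(cells: set[tuple[int, int]], labels: list[list[int]], radius: int) -> set[int]:
--     h, w = len(labels), len(labels[0])
--     found: set[int] = set()
--     offsets = [(dx, dy) for dy in range(-radius, radius + 1) for dx in range(-radius, radius + 1)
--                if abs(dx) + abs(dy) <= radius]
--     for x, y in cells:
--         for dx, dy in offsets:
--             nx, ny = x + dx, y + dy
--             if 0 <= nx < w and 0 <= ny < h:
--                 lab = labels[ny][nx]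
--                 if lab >= 0:
--                     found.add(lab)
--     return found
-- ===== SOURCE B (Python) =====
-- def nearby_labels(cells: set[tuple[int, int]], labels: list[list[int]], radius: int) -> set[int]:
--     h, w = len(labels), len(labels[0])
--
--     def row_span(row, x, rem):
--         return row[max(0, x - rem): max(0, min(w, x + rem + 1))]
--
--     segments = [row_span(labels[ny], x, radius - abs(ny - y))
--                 for x, y in cells
--                 for ny in range(max(0, y - radius), min(h, y + radius + 1))]
--     return {lab for seg in segments for lab in seg if lab >= 0}
-- ===== Notes on version B (the rewrite author's own statement) =====
-- stated objective: faster
-- what changed: B drops A's precomputed Manhattan-offset list, per-neighbour bounds test and element-wise set accumulation: per cell it takes one contiguous slice of each in-grid row of the diamond (bounds clamped arithmetically) and collects the labels with a single staged set comprehension over those slices, so the work is bounded by the in-grid part of each diamond instead of the full (2r+1)^2 offset square.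
-- outside the precondition, e.g. on nearby_labels({(0, 0)}, [[1], []], 1): A raises IndexError, B returns {1}
import Mathlib
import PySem

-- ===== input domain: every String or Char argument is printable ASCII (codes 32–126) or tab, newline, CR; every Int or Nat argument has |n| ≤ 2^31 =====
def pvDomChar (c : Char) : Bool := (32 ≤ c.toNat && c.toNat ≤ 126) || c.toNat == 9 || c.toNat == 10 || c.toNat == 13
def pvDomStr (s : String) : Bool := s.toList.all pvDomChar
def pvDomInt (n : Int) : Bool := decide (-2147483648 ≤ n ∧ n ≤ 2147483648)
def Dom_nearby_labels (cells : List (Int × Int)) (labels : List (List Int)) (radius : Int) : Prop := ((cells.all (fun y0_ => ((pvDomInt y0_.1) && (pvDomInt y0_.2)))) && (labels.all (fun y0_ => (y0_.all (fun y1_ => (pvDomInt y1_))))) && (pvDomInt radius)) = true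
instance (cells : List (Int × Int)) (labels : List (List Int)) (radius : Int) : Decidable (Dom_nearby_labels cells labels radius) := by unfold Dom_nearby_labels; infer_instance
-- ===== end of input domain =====

-- B drops A's offset list, per-neighbour bounds test and element-wise set accumulation: it takes one
-- contiguous SLICE of each in-grid row of the diamond and collects the labels in a single staged
-- set comprehension over those slices; work is bounded by the in-grid part of each diamond, not by (2r+1)^2.

-- ===== PORT A =====
def nearby_labels (cells : List (Int × Int)) (labels : List (List Int)) (radius : Int) : List Int :=
  let h : Int := labels.length
  let w : Int := (labels.headD []).length  -- len(labels[0]); IndexError on labels = [], excluded by Pre_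
  let offsets : List (Int × Int) :=
    (PySem.List.pyRange (-radius) (radius + 1)).foldl (fun acc dy =>
      (PySem.List.pyRange (-radius) (radius + 1)).foldl (fun acc dx =>
        if |dx| + |dy| ≤ radius then acc ++ [(dx, dy)] else acc) acc) []
  cells.foldl (fun found xy =>
    offsets.foldl (fun found d =>
      if 0 ≤ xy.1 + d.1 ∧ xy.1 + d.1 < w ∧ 0 ≤ xy.2 + d.2 ∧ xy.2 + d.2 < h then
        -- labels[ny][nx]: ny in [0,h) by the guard; nx < w ≤ row length by Pre_, so the default is never read
        let lab := PySem.List.pyGetD (PySem.List.pyGetD labels (xy.2 + d.2) []) (xy.1 + d.1) (-1)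
        if 0 ≤ lab then PySem.Set.add found lab else found
      else found) found) PySem.Set.empty

-- ===== PORT B =====
-- row_span(row, x, rem) = row[max(0, x - rem) : max(0, min(w, x + rem + 1))]
def pvRowSpan (w : Int) (row : List Int) (x rem : Int) : List Int :=
  PySem.List.slice row (some (max 0 (x - rem))) (some (max 0 (min w (x + rem + 1))))

def nearby_labels_alt (cells : List (Int × Int)) (labels : List (List Int)) (radius : Int) : List Int :=
  let h : Int := labels.length
  let w : Int := (labels.headD []).length  -- len(labels[0]); IndexError on labels = [], excluded by Pre_
  let segments : List (List Int) :=
    cells.flatMap (fun xy =>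
      (PySem.List.pyRange (max 0 (xy.2 - radius)) (min h (xy.2 + radius + 1))).map (fun ny =>
        pvRowSpan w (PySem.List.pyGetD labels ny []) xy.1 (radius - |ny - xy.2|)))
  PySem.Set.ofList (segments.flatMap (fun seg => seg.filter (fun lab => decide (0 ≤ lab))))

-- ===== PRECONDITION & SPEC =====
-- Pre_ excludes exactly the inputs on which the Python A raises IndexError: labels = [] (len(labels[0])
-- raises), or a ragged grid in which some short row is reached by the in-grid Manhattan neighbourhood of
-- some cell (labels[ny][nx] raises there).
def Pre_nearby_labels (cells : List (Int × Int)) (labels : List (List Int)) (radius : Int) : Prop :=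
  labels ≠ [] ∧ ∀ i < labels.length, ∀ j < (labels.headD []).length,
    (∃ c ∈ cells, |(j : Int) - c.1| + |(i : Int) - c.2| ≤ radius) → j < (labels.getD i []).length
instance (cells : List (Int × Int)) (labels : List (List Int)) (radius : Int) : Decidable (Pre_nearby_labels cells labels radius) := by unfold Pre_nearby_labels; infer_instance

def pvWitness_nearby_labels : (List (Int × Int)) × List (List Int) × Int := ([(0, 0), (3, 1)], [[1, 2, -1], [0, 5, 2]], 1)

def Spec_nearby_labels (cells : List (Int × Int)) (labels : List (List Int)) (radius : Int) (out : List Int) : Prop := out = nearby_labels_alt cells labels radius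
instance (cells : List (Int × Int)) (labels : List (List Int)) (radius : Int) (out : List Int) : Decidable (Spec_nearby_labels cells labels radius out) := by unfold Spec_nearby_labels; infer_instance

-- ===== CLAIM (what is proved, stated in full; the proofs are below) =====
def Claim_equal_nearby_labels : Prop := ∀ (cells : List (Int × Int)) (labels : List (List Int)) (radius : Int), Dom_nearby_labels cells labels radius → Pre_nearby_labels cells labels radius → Spec_nearby_labels cells labels radius (nearby_labels cells labels radius)

-- ===== LEMMAS AND PROOFS =====

-- shifting an integer range
lemma pvMapAdd (x a b : Int) :
    (PySem.List.pyRange a b).map (fun t => x + t) = PySem.List.pyRange (x + a) (x + b) := by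
  rw [PySem.List.pyRange_one, PySem.List.pyRange_one]
  have hd : x + b - (x + a) = b - a := by ring
  rw [hd, List.map_map]
  apply List.map_congr_left
  intro k _
  simp [Function.comp]
  ring

-- filtering an integer range by an interval condition clips its bounds
lemma pvFilterClip (p : Int → Bool) (lo hi : Int) (hp : ∀ t, p t = true ↔ (lo ≤ t ∧ t < hi)) :
    ∀ (n : Nat) (a b : Int), (b - a).toNat = n →
      (PySem.List.pyRange a b).filter p = PySem.List.pyRange (max a lo) (min b hi) := by
  intro n
  induction n with
  | zero =>
    intro a b hab
    rw [PySem.List.pyRange_one_eq_nil (by omega), PySem.List.pyRange_one_eq_nil (by omega)]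
    rfl
  | succ n ih =>
    intro a b hab
    have hlt : a < b := by omega
    rw [PySem.List.pyRange_one_cons hlt]
    by_cases hk : lo ≤ a ∧ a < hi
    · rw [List.filter_cons_of_pos ((hp a).mpr hk), ih (a + 1) b (by omega)]
      have h1 : max (a + 1) lo = a + 1 := by omega
      have h2 : max a lo = a := by omega
      rw [h1, h2, ← PySem.List.pyRange_one_cons (by omega)]
    · rw [List.filter_cons_of_neg (by simp [hp a, hk]), ih (a + 1) b (by omega)]
      rcases not_and_or.mp hk with hlo | hhi
      · have : max (a + 1) lo = max a lo := by omega
        rw [this]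
      · rw [PySem.List.pyRange_one_eq_nil (by omega), PySem.List.pyRange_one_eq_nil (by omega)]

-- the per-cell loop of A (offset list + bounds guard) equals clipped nested ranges,
-- for ANY body g consuming the visited (ny, nx)
lemma pvInner (g : List Int → Int → Int → List Int) (r x y h w : Int) (s : List Int) :
    ((PySem.List.pyRange (-r) (r + 1)).foldl (fun acc dy =>
        (PySem.List.pyRange (-r) (r + 1)).foldl (fun acc dx =>
          if |dx| + |dy| ≤ r then acc ++ [(dx, dy)] else acc) acc) []).foldl
      (fun s d => if 0 ≤ x + d.1 ∧ x + d.1 < w ∧ 0 ≤ y + d.2 ∧ y + d.2 < h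
                  then g s (y + d.2) (x + d.1) else s) s
    = (PySem.List.pyRange (max 0 (y - r)) (min h (y + r + 1))).foldl (fun s ny =>
        (PySem.List.pyRange (max 0 (x - (r - |ny - y|))) (min w (x + (r - |ny - y|) + 1))).foldl
          (fun s nx => g s ny nx) s) s := by
  have hoff : (PySem.List.pyRange (-r) (r + 1)).foldl (fun acc dy =>
        (PySem.List.pyRange (-r) (r + 1)).foldl (fun acc dx =>
          if |dx| + |dy| ≤ r then acc ++ [(dx, dy)] else acc) acc) ([] : List (Int × Int))
      = (PySem.List.pyRange (-r) (r + 1)).flatMap (fun dy =>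
          ((PySem.List.pyRange (-r) (r + 1)).filter
            (fun dx => decide (|dx| + |dy| ≤ r))).map (fun dx => (dx, dy))) := by
    rw [PySem.List.foldl_congr_mem' _ _
        (fun acc dy => acc ++ ((PySem.List.pyRange (-r) (r + 1)).filter
            (fun dx => decide (|dx| + |dy| ≤ r))).map (fun dx => (dx, dy))) _
        (by
          intro dy _ acc
          rw [PySem.List.foldl_ite_eq_foldl_filter (p := fun dx => |dx| + |dy| ≤ r)
              (f := fun acc dx => acc ++ [(dx, dy)]),
            PySem.List.foldl_append_singleton_eq_map])]
    rw [PySem.List.foldl_append_eq_flatMap]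
    rfl
  rw [hoff, List.foldl_flatMap]
  have hrow : ∀ dy ∈ PySem.List.pyRange (-r) (r + 1), ∀ s : List Int,
      (((PySem.List.pyRange (-r) (r + 1)).filter (fun dx => decide (|dx| + |dy| ≤ r))).map
          (fun dx => (dx, dy))).foldl
        (fun s d => if 0 ≤ x + d.1 ∧ x + d.1 < w ∧ 0 ≤ y + d.2 ∧ y + d.2 < h
                    then g s (y + d.2) (x + d.1) else s) s
      = (fun (s : List Int) (ny : Int) => if 0 ≤ ny ∧ ny < h then
            (PySem.List.pyRange (max 0 (x - (r - |ny - y|))) (min w (x + (r - |ny - y|) + 1))).foldl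
              (fun s nx => g s ny nx) s
          else s) s (y + dy) := by
    intro dy hdy s
    have hdy' : -r ≤ dy ∧ dy < r + 1 := (PySem.List.mem_pyRange_one).mp hdy
    have habs : |dy| ≤ r := abs_le.mpr (by omega)
    have hyd : y + dy - y = dy := by ring
    rw [List.foldl_map]
    rw [pvFilterClip (fun dx => decide (|dx| + |dy| ≤ r)) (-(r - |dy|)) (r - |dy| + 1)
        (by intro t; rw [decide_eq_true_eq]; rw [Int.abs_eq_natAbs, Int.abs_eq_natAbs]; omega)
        _ (-r) (r + 1) rfl]
    have e1 : max (-r) (-(r - |dy|)) = -(r - |dy|) := by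
      have := abs_nonneg dy; omega
    rw [e1]
    have e2 : min (r + 1) (r - |dy| + 1) = r - |dy| + 1 := by
      have := abs_nonneg dy; omega
    rw [e2]
    simp only [hyd]
    by_cases hny : 0 ≤ y + dy ∧ y + dy < h
    · simp only [if_pos hny]
      show (PySem.List.pyRange (-(r - |dy|)) (r - |dy| + 1)).foldl
          (fun (s : List Int) (dx : Int) =>
            if 0 ≤ x + dx ∧ x + dx < w ∧ 0 ≤ y + dy ∧ y + dy < h
            then g s (y + dy) (x + dx) else s) s
        = (PySem.List.pyRange (max 0 (x - (r - |dy|))) (min w (x + (r - |dy|) + 1))).foldl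
            (fun s nx => g s (y + dy) nx) s
      have hb : (fun (s : List Int) (dx : Int) =>
            if 0 ≤ x + dx ∧ x + dx < w ∧ 0 ≤ y + dy ∧ y + dy < h then g s (y + dy) (x + dx) else s)
          = fun s dx => if 0 ≤ x + dx ∧ x + dx < w then g s (y + dy) (x + dx) else s := by
        funext s dx
        by_cases hc : 0 ≤ x + dx ∧ x + dx < w
        · rw [if_pos ⟨hc.1, hc.2, hny.1, hny.2⟩, if_pos hc]
        · rw [if_neg (by tauto), if_neg hc]
      rw [hb]
      rw [PySem.List.foldl_ite_eq_foldl_filter (p := fun dx => 0 ≤ x + dx ∧ x + dx < w)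
          (f := fun s dx => g s (y + dy) (x + dx))]
      rw [pvFilterClip (fun dx => decide (0 ≤ x + dx ∧ x + dx < w)) (-x) (w - x)
          (by intro t; rw [decide_eq_true_eq]; omega) _ _ _ rfl]
      rw [← List.foldl_map (f := fun dx => x + dx) (g := fun s nx => g s (y + dy) nx)]
      rw [pvMapAdd]
      have e3 : x + max (-(r - |dy|)) (-x) = max 0 (x - (r - |dy|)) := by omega
      have e4 : x + min (r - |dy| + 1) (w - x) = min w (x + (r - |dy|) + 1) := by omega
      rw [e3, e4]
    · simp only [if_neg hny]
      have hb : (fun (s : List Int) (dx : Int) =>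
            if 0 ≤ x + dx ∧ x + dx < w ∧ 0 ≤ y + dy ∧ y + dy < h
            then g s (y + dy) (x + dx) else s) = fun s _ => s := by
        funext s dx
        rw [if_neg (by tauto)]
      show (PySem.List.pyRange (-(r - |dy|)) (r - |dy| + 1)).foldl
          (fun (s : List Int) (dx : Int) =>
            if 0 ≤ x + dx ∧ x + dx < w ∧ 0 ≤ y + dy ∧ y + dy < h
            then g s (y + dy) (x + dx) else s) s = s
      rw [hb]
      exact List.foldl_fixed _
  rw [PySem.List.foldl_congr_mem' _ _
      (fun s dy => (fun (s : List Int) (ny : Int) => if 0 ≤ ny ∧ ny < h then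
          (PySem.List.pyRange (max 0 (x - (r - |ny - y|))) (min w (x + (r - |ny - y|) + 1))).foldl
            (fun s nx => g s ny nx) s
        else s) s (y + dy)) _ hrow]
  rw [← List.foldl_map (f := fun dy => y + dy)
      (g := fun (s : List Int) (ny : Int) => if 0 ≤ ny ∧ ny < h then
          (PySem.List.pyRange (max 0 (x - (r - |ny - y|))) (min w (x + (r - |ny - y|) + 1))).foldl
            (fun s nx => g s ny nx) s
        else s)]
  rw [pvMapAdd]
  have e5 : y + -r = y - r := by ring
  have e6 : y + (r + 1) = y + r + 1 := by ring
  rw [e5, e6]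
  rw [PySem.List.foldl_ite_eq_foldl_filter (p := fun ny => 0 ≤ ny ∧ ny < h)
      (f := fun (s : List Int) (ny : Int) =>
        (PySem.List.pyRange (max 0 (x - (r - |ny - y|))) (min w (x + (r - |ny - y|) + 1))).foldl
          (fun s nx => g s ny nx) s)]
  rw [pvFilterClip (fun ny => decide (0 ≤ ny ∧ ny < h)) 0 h
      (by intro t; rw [decide_eq_true_eq]) _ _ _ rfl]
  have e7 : max (y - r) 0 = max 0 (y - r) := by omega
  have e8 : min (y + r + 1) h = min h (y + r + 1) := by omega
  rw [e7, e8]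

-- a slice with in-length bounds is the row read index by index
lemma pvSliceMap (xs : List Int) (a b : Int) (d : Int) (ha : 0 ≤ a) (hb0 : 0 ≤ b)
    (hb : b ≤ xs.length) :
    PySem.List.slice xs (some a) (some b)
      = (PySem.List.pyRange a b).map (fun j => PySem.List.pyGetD xs j d) := by
  rw [PySem.List.slice_toNat xs ha hb0, PySem.List.pyRange_one, List.map_map]
  apply List.ext_getElem
  · simp [List.length_take, List.length_drop]
    omega
  · intro i h1 h2
    simp only [List.length_take, List.length_drop, lt_min_iff] at h1
    rw [List.getElem_take, List.getElem_drop, List.getElem_map, List.getElem_range]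
    show xs[a.toNat + i] = PySem.List.pyGetD xs (a + (i : Int)) d
    rw [PySem.List.pyGetD_eq_getElem xs d (by omega) (by omega)]
    congr 1
    omega

-- ===== VERDICT (by name: the statement is the Claim_ definition above) =====
theorem nearby_labels_spec : Claim_equal_nearby_labels := by
  intro cells labels radius _ hpre
  unfold Spec_nearby_labels nearby_labels nearby_labels_alt
  simp only []
  rw [PySem.Set.ofList_eq_foldl, List.foldl_flatMap, List.foldl_flatMap,
    show (PySem.Set.empty : List Int) = [] from rfl]
  apply PySem.List.foldl_congr_mem'
  intro xy hxy found
  rw [pvInner (fun s ny nx =>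
      let lab := PySem.List.pyGetD (PySem.List.pyGetD labels ny []) nx (-1)
      if 0 ≤ lab then PySem.Set.add s lab else s)
    radius xy.1 xy.2 labels.length (labels.headD []).length found]
  rw [List.foldl_map]
  apply PySem.List.foldl_congr_mem'
  intro ny hny s
  have hny' := (PySem.List.mem_pyRange_one).mp hny
  set rem := radius - |ny - xy.2| with hrem
  have hrem0 : 0 ≤ rem := by
    have h1 : |ny - xy.2| ≤ radius := abs_le.mpr (by omega)
    omega
  set lo := max 0 (xy.1 - rem) with hlo
  set hi := min ((labels.headD []).length : Int) (xy.1 + rem + 1) with hhi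
  set row := PySem.List.pyGetD labels ny [] with hrowdef
  have hnylen : ny.toNat < labels.length := by omega
  have hrowget : row = labels[ny.toNat] :=
    PySem.List.pyGetD_eq_getElem labels [] (by omega) (by omega)
  -- clamp the empty range
  have hcl : PySem.List.pyRange lo hi = PySem.List.pyRange lo (max 0 hi) := by
    rcases le_or_gt 0 hi with h | h
    · rw [max_eq_right h]
    · rw [PySem.List.pyRange_one_eq_nil (by omega), PySem.List.pyRange_one_eq_nil (by omega)]
  rw [hcl]
  -- turn A's guarded index loop into a fold of add over a filtered map
  rw [show (fun (s : List Int) (nx : Int) =>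
        let lab := PySem.List.pyGetD (PySem.List.pyGetD labels ny []) nx (-1)
        if 0 ≤ lab then PySem.Set.add s lab else s)
      = fun s nx => if 0 ≤ PySem.List.pyGetD row nx (-1)
                    then PySem.Set.add s (PySem.List.pyGetD row nx (-1)) else s from rfl]
  rw [← List.foldl_map (f := fun nx => PySem.List.pyGetD row nx (-1))
      (g := fun s v => if 0 ≤ v then PySem.Set.add s v else s)]
  rw [PySem.List.foldl_ite_eq_foldl_filter (p := fun v => 0 ≤ v) (f := PySem.Set.add)]
  -- so it suffices that B's row slice reads exactly those indices
  suffices hseg : pvRowSpan ((labels.headD []).length : Int) row xy.1 rem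
      = (PySem.List.pyRange lo (max 0 hi)).map (fun nx => PySem.List.pyGetD row nx (-1)) by
    rw [hseg]
  unfold pvRowSpan
  rw [show max 0 (min ((labels.headD []).length : Int) (xy.1 + rem + 1)) = max 0 hi from rfl,
    show max 0 (xy.1 - rem) = lo from rfl]
  rcases le_or_gt (max 0 hi) lo with hle | hgt
  · -- both sides empty
    rw [PySem.List.pyRange_one_eq_nil hle, List.map_nil,
      PySem.List.slice_toNat row (by omega) (by omega),
      show (max 0 hi).toNat - lo.toNat = 0 from by omega, List.take_zero]
  · -- Pre_ bounds the slice inside the row (witness index: max 0 hi - 1 = hi - 1)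
    have h0 : 0 < hi := by omega
    have hm : max 0 hi = hi := by omega
    have hj : (hi - 1).toNat < (labels.headD []).length := by omega
    have hpj := hpre.2 ny.toNat hnylen (hi - 1).toNat hj ?wit
    case wit =>
      refine ⟨xy, hxy, ?_⟩
      rw [Int.toNat_of_nonneg (by omega), Int.toNat_of_nonneg (by omega)]
      have h1 : |(hi - 1) - xy.1| ≤ rem := abs_le.mpr ⟨by omega, by omega⟩
      have h2 : |ny - xy.2| = radius - rem := by rw [hrem]; ring
      linarith
    rw [List.getD_eq_getElem labels [] hnylen, ← hrowget] at hpj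
    have hblen : max 0 hi ≤ (row.length : Int) := by omega
    exact pvSliceMap row lo (max 0 hi) (-1) (by omega) (by omega) (by exact_mod_cast hblen)
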